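-- pv_equiv track=rewrite | github.com/raditotev/agent-auth | src/agentauth/api/v1/auth.py | _validate_scopes
-- ===== SOURCE A (Python) =====
-- def _scope_is_allowed(requested: str, allowed_patterns: list[str]) -> bool:
--     """Check if a requested scope is covered by any of the allowed scope patterns.
--
--     Supports wildcard patterns: 'files.*' covers 'files.read', 'files.write', etc.
--     """
--     for pattern in allowed_patterns:
--         if pattern.endswith(".*"):
--             prefix = pattern[:-1]  # strip '*', keep the dot
--             if requested.startswith(prefix):
--                 return True
--         elif pattern == requested:
--             return True
--     return False
--
-- def _validate_scopes(
--     requested_scopes: list[str],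
--     allowed_scopes: list[str],
-- ) -> list[str] | None:
--     """
--     Validate requested scopes against allowed scopes.
--
--     Ensures no scope escalation: each requested scope must be covered
--     by at least one allowed scope pattern (supports wildcards like 'files.*').
--     If no scopes are requested, all allowed scopes are granted.
--
--     Args:
--         requested_scopes: Scopes requested by client
--         allowed_scopes: Scopes allowed by credential (may include wildcards)
--
--     Returns:
--         Validated scopes to grant, or None if validation fails
--     """
--     # If no scopes requested, grant all allowed scopes
--     if not requested_scopes:
--         return allowed_scopes
--
--     # Each requested scope must be covered by an allowed pattern
--     for scope in requested_scopes:
--         if not _scope_is_allowed(scope, allowed_scopes):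
--             return None
--
--     return requested_scopes
-- ===== SOURCE B (Python) =====
-- def _validate_scopes(requested_scopes, allowed_scopes):
--     # Pattern-major elimination: walk the allowed patterns once, striking out the
--     # requested scopes each pattern covers; validation succeeds iff nothing is left.
--     if not requested_scopes:
--         return allowed_scopes
--     remaining = set(requested_scopes)
--     for pattern in allowed_scopes:
--         if pattern.endswith(".*"):
--             prefix = pattern[:-1]
--             remaining = {s for s in remaining if not s.startswith(prefix)}
--         else:
--             remaining.discard(pattern)
--     return requested_scopes if not remaining else None
-- ===== Notes on version B (the rewrite author's own statement) =====
-- stated objective: alternative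
-- what changed: B inverts the loop nesting: instead of A's scope-major scan (for each requested scope, rescan all patterns until a match), B walks the allowed patterns once and eliminates from a shrinking set of requested scopes every scope the pattern covers, succeeding iff the set empties.
import Mathlib
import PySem

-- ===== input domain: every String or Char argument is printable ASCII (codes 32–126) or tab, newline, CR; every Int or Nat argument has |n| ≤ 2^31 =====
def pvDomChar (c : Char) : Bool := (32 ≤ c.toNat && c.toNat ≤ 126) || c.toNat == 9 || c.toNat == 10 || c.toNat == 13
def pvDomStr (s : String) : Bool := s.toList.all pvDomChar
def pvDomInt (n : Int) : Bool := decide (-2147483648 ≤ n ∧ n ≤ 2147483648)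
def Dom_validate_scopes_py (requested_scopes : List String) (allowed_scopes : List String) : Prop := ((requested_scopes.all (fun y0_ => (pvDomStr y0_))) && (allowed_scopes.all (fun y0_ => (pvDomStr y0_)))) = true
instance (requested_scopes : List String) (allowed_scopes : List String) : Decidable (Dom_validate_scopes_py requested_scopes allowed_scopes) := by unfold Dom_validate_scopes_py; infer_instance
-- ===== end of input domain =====

-- B inverts the loop nesting: one pass over the allowed patterns eliminates, from a set of
-- still-uncovered requested scopes, every scope the pattern covers; success iff the set empties.

-- ===== PORT A =====
-- _scope_is_allowed: scan the patterns in order, early return on match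
def scope_is_allowed (requested : String) (allowed_patterns : List String) : Bool :=
  match allowed_patterns with
  | [] => false
  | pattern :: rest =>
    if PySem.Str.endswith pattern ".*" then
      -- prefix = pattern[:-1]
      if PySem.Str.startswith requested (PySem.Str.slice pattern none (some (-1))) then true
      else scope_is_allowed requested rest
    else if pattern == requested then true
    else scope_is_allowed requested rest

-- the 'for scope in requested_scopes' loop with its early 'return None'
def vs_loop (scopes : List String) (allowed_scopes : List String) (requested_scopes : List String) : Option (List String) :=
  match scopes with
  | [] => some requested_scopes
  | scope :: rest =>
    if !scope_is_allowed scope allowed_scopes then none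
    else vs_loop rest allowed_scopes requested_scopes

def validate_scopes_py (requested_scopes : List String) (allowed_scopes : List String) : Option (List String) :=
  if requested_scopes.isEmpty then some allowed_scopes
  else vs_loop requested_scopes allowed_scopes requested_scopes

-- ===== PORT B =====
-- one step of B's 'for pattern in allowed_scopes' loop over the remaining set
def vs_elim_step (rem : PySem.Set String) (pattern : String) : PySem.Set String :=
  if PySem.Str.endswith pattern ".*" then
    rem.filter (fun s => !PySem.Str.startswith s (PySem.Str.slice pattern none (some (-1))))
  else PySem.Set.discard rem pattern

def validate_scopes_py_alt (requested_scopes : List String) (allowed_scopes : List String) : Option (List String) :=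
  if requested_scopes.isEmpty then some allowed_scopes
  else
    let remaining := allowed_scopes.foldl vs_elim_step (PySem.Set.ofList requested_scopes)
    if remaining.isEmpty then some requested_scopes else none

-- ===== PRECONDITION & SPEC =====
def Spec_validate_scopes_py (requested_scopes : List String) (allowed_scopes : List String) (out : Option (List String)) : Prop := out = validate_scopes_py_alt requested_scopes allowed_scopes
instance (requested_scopes : List String) (allowed_scopes : List String) (out : Option (List String)) : Decidable (Spec_validate_scopes_py requested_scopes allowed_scopes out) := by unfold Spec_validate_scopes_py; infer_instance

-- ===== CLAIM =====
def Claim_equal_validate_scopes_py : Prop := ∀ (requested_scopes : List String) (allowed_scopes : List String), Dom_validate_scopes_py requested_scopes allowed_scopes → Spec_validate_scopes_py requested_scopes allowed_scopes (validate_scopes_py requested_scopes allowed_scopes)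

-- ===== LEMMAS AND PROOFS =====

-- membership after B's elimination fold: a scope survives iff it was there and no pattern covers it
theorem mem_elim_fold (allowed : List String) (rem : PySem.Set String) (s : String) :
    s ∈ allowed.foldl vs_elim_step rem ↔ s ∈ rem ∧ ¬ scope_is_allowed s allowed := by
  induction allowed generalizing rem with
  | nil => simp [scope_is_allowed]
  | cons p rest ih =>
    simp only [List.foldl_cons, ih]
    by_cases hw : PySem.Chars.endswith p.toList ['.', '*'] = true
    · by_cases hs : PySem.Chars.startswith s.toList (PySem.List.slice p.toList none (some (-1))) = true
      · simp [vs_elim_step, scope_is_allowed, hw, hs, List.mem_filter]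
      · simp [vs_elim_step, scope_is_allowed, hw, hs, List.mem_filter]
    · by_cases he : p = s
      · subst he
        simp [vs_elim_step, scope_is_allowed, hw, PySem.Set.mem_discard]
      · simp [vs_elim_step, scope_is_allowed, hw, he, Ne.symm he, PySem.Set.mem_discard]

theorem vs_loop_eq (scopes allowed req : List String) :
    vs_loop scopes allowed req =
      (if scopes.all (fun s => scope_is_allowed s allowed) then some req else none) := by
  induction scopes with
  | nil => simp [vs_loop]
  | cons s rest ih =>
    by_cases h : scope_is_allowed s allowed = true
    · simp [vs_loop, h, ih]
    · simp [vs_loop, h]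

-- ===== VERDICT =====
theorem validate_scopes_py_spec : Claim_equal_validate_scopes_py := by
  intro req allowed _
  unfold Spec_validate_scopes_py validate_scopes_py validate_scopes_py_alt
  by_cases h : req.isEmpty
  · simp [h]
  · simp only [h, vs_loop_eq]
    have hmem : ∀ s, s ∈ allowed.foldl vs_elim_step (PySem.Set.ofList req) ↔
        s ∈ req ∧ ¬ scope_is_allowed s allowed := by
      intro s; rw [mem_elim_fold]; simp [PySem.Set.mem_ofList]
    by_cases hall : req.all (fun s => scope_is_allowed s allowed) = true
    · have : (allowed.foldl vs_elim_step (PySem.Set.ofList req)).isEmpty = true := by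
        rw [List.isEmpty_iff]; rw [List.eq_nil_iff_forall_not_mem]
        intro s hs
        rcases (hmem s).1 hs with ⟨hin, hno⟩
        exact hno (by simpa using List.all_eq_true.1 hall s hin)
      simp [hall, this]
    · have hex : ∃ s ∈ req, scope_is_allowed s allowed = false := by
        by_contra hno
        push Not at hno
        exact hall (List.all_eq_true.2 fun s hs => by
          simpa [Bool.not_eq_false] using hno s hs)
      rcases hex with ⟨s, hsreq, hsf⟩
      have hmem' : s ∈ allowed.foldl vs_elim_step (PySem.Set.ofList req) :=
        (hmem s).2 ⟨hsreq, by simp [hsf]⟩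
      have hE : (allowed.foldl vs_elim_step (PySem.Set.ofList req)).isEmpty = false := by
        cases hE : (allowed.foldl vs_elim_step (PySem.Set.ofList req)).isEmpty
        · rfl
        · rw [List.isEmpty_iff] at hE; simp [hE] at hmem'
      simp [hall, hE]
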